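-- pv_equiv track=rewrite | github.com/poungpoung2/SAM2-GUI | gradio_app.py | unannotated_traffic
-- ===== SOURCE A (Python) =====
-- def unannotated_traffic(id_2_objs, id_2_traffic, total_frames):
--     # Set of all frames in the video
--     all_frames = set(range(total_frames))
--     unannotated = []
--     # Loop through all the objects
--     for obj_id, label in id_2_objs.items():
--         # Check if the traffic object
--         if "bulb" in label:
--             # Get the range of annotated frames
--             annotated_frames = set(id_2_traffic.get(obj_id, {}).keys())
--             # Ge the frames that the state is not assigned
--             missing_frames = sorted(all_frames - annotated_frames)
--
--             if missing_frames:
--                 # Group missing frames into ranges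
--                 ranges = []
--                 start = prev = missing_frames[0]
--                 # Loop through the frame to add ranges
--                 for frame in missing_frames[1:]:
--                     if frame == prev + 1:
--                         prev = frame
--                     else:
--                         ranges.append((start, prev))
--                         start = prev = frame
--                 # Add the last range
--                 ranges.append((start, prev))
--
--                 # Create a combined range string
--                 range_str = " ".join(
--                     f"{start}-{end}" if start != end else f"{start}"
--                     for start, end in ranges
--                 )
--                 unannotated.append(f"{obj_id}_{label}_missing: {range_str}")
--
--     return unannotated
-- ===== SOURCE B (Python) =====
-- def unannotated_traffic(id_2_objs, id_2_traffic, total_frames):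
--     unannotated = []
--     for obj_id, label in id_2_objs.items():
--         if "bulb" not in label:
--             continue
--         annotated = id_2_traffic.get(obj_id, {})
--         # One forward pass over the frames: maintain the currently open
--         # missing run and close it whenever an annotated frame is hit.
--         ranges = []
--         cur = None
--         for frame in range(total_frames):
--             if frame in annotated:
--                 if cur is not None:
--                     ranges.append(cur)
--                     cur = None
--             elif cur is None:
--                 cur = (frame, frame)
--             else:
--                 cur = (cur[0], frame)
--         if cur is not None:
--             ranges.append(cur)
--         if ranges:
--             range_str = " ".join(
--                 f"{s}-{e}" if s != e else f"{s}" for s, e in ranges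
--             )
--             unannotated.append(f"{obj_id}_{label}_missing: {range_str}")
--     return unannotated
-- ===== Notes on version B (the rewrite author's own statement) =====
-- stated objective: alternative
-- what changed: Instead of building set(range(total_frames)), subtracting the annotated-key set and sorting the whole missing list before a second run-grouping loop, B makes one forward pass over range(total_frames) per bulb object, closing/extending the current missing run on the fly.
import Mathlib
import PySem

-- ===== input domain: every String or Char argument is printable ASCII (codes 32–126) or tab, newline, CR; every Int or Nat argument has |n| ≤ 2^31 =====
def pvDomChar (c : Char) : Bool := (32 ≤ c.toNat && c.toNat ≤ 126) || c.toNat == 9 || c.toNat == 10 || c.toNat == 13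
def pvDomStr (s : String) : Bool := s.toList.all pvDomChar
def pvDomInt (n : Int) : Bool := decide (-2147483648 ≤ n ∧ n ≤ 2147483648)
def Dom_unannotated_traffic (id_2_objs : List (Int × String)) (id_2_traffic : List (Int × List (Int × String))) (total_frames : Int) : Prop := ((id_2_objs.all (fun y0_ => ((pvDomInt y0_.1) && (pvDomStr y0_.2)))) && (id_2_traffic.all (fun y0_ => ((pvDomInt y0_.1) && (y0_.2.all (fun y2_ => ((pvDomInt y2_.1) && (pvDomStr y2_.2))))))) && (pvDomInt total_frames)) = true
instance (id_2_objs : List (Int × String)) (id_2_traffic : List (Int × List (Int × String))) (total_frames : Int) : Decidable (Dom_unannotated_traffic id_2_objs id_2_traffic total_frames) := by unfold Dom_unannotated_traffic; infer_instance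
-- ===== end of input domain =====

-- B replaces A's per-object set difference + full sort of all missing frames by a single
-- forward pass over range(total_frames) that builds the missing ranges directly.

-- ===== PORT A =====
-- f"{s}-{e}" if s != e else f"{s}"  (shared string formatting, identical in both Pythons)
def pvRangeStr (ranges : List (Int × Int)) : String :=
  PySem.Str.join " " (ranges.map (fun r =>
    if r.1 ≠ r.2 then PySem.Int.toStr r.1 ++ "-" ++ PySem.Int.toStr r.2 else PySem.Int.toStr r.1))

-- f"{obj_id}_{label}_missing: {range_str}"
def pvLine (obj_id : Int) (label : String) (range_str : String) : String :=
  PySem.Int.toStr obj_id ++ "_" ++ label ++ "_missing: " ++ range_str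

-- body of A's inner 'for frame in missing_frames[1:]' loop, state (ranges, start, prev)
def pvStepA (st : List (Int × Int) × Int × Int) (frame : Int) : List (Int × Int) × Int × Int :=
  if frame = st.2.2 + 1 then (st.1, st.2.1, frame)
  else (st.1 ++ [(st.2.1, st.2.2)], frame, frame)

def unannotated_traffic (id_2_objs : List (Int × String)) (id_2_traffic : List (Int × List (Int × String))) (total_frames : Int) : List String :=
  let all_frames : PySem.Set Int := PySem.Set.ofList (PySem.List.pyRange 0 total_frames 1)
  let traffD : PySem.Dict Int (List (Int × String)) := PySem.Dict.ofList id_2_traffic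
  (PySem.Dict.ofList id_2_objs).items.foldl (fun unannotated p =>
    let obj_id := p.1
    let label := p.2
    if PySem.Str.isIn "bulb" label then
      let annotated_frames : PySem.Set Int :=
        PySem.Set.ofList (PySem.Dict.keys (PySem.Dict.ofList (traffD.getD obj_id [])))
      let missing_frames := PySem.List.sorted (PySem.Set.diff all_frames annotated_frames) (fun x => x)
      match missing_frames with
      | [] => unannotated
      | m0 :: rest =>
        let t := rest.foldl pvStepA ([], m0, m0)
        let ranges := t.1 ++ [(t.2.1, t.2.2)]
        unannotated ++ [pvLine obj_id label (pvRangeStr ranges)]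
    else unannotated) []

-- ===== PORT B =====
-- body of B's single pass over the frames, state (ranges, current open missing run)
def pvStepB (ann : PySem.Dict Int String) (st : List (Int × Int) × Option (Int × Int)) (frame : Int) : List (Int × Int) × Option (Int × Int) :=
  if ann.contains frame then
    match st.2 with
    | some c => (st.1 ++ [c], none)
    | none => st
  else
    match st.2 with
    | none => (st.1, some (frame, frame))
    | some c => (st.1, some (c.1, frame))

def unannotated_traffic_alt (id_2_objs : List (Int × String)) (id_2_traffic : List (Int × List (Int × String))) (total_frames : Int) : List String :=
  let traffD : PySem.Dict Int (List (Int × String)) := PySem.Dict.ofList id_2_traffic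
  (PySem.Dict.ofList id_2_objs).items.foldl (fun unannotated p =>
    let obj_id := p.1
    let label := p.2
    if PySem.Str.isIn "bulb" label then
      let annotated : PySem.Dict Int String := PySem.Dict.ofList (traffD.getD obj_id [])
      let t := (PySem.List.pyRange 0 total_frames 1).foldl (pvStepB annotated) ([], none)
      let ranges := t.1 ++ (match t.2 with | some c => [c] | none => [])
      if ranges.isEmpty then unannotated
      else unannotated ++ [pvLine obj_id label (pvRangeStr ranges)]
    else unannotated) []

-- ===== PRECONDITION & SPEC =====
def Spec_unannotated_traffic (id_2_objs : List (Int × String)) (id_2_traffic : List (Int × List (Int × String))) (total_frames : Int) (out : List String) : Prop := out = unannotated_traffic_alt id_2_objs id_2_traffic total_frames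
instance (id_2_objs : List (Int × String)) (id_2_traffic : List (Int × List (Int × String))) (total_frames : Int) (out : List String) : Decidable (Spec_unannotated_traffic id_2_objs id_2_traffic total_frames out) := by unfold Spec_unannotated_traffic; infer_instance

-- ===== CLAIM (what is proved, stated in full; the proofs are below) =====
def Claim_equal_unannotated_traffic : Prop := ∀ (id_2_objs : List (Int × String)) (id_2_traffic : List (Int × List (Int × String))) (total_frames : Int), Dom_unannotated_traffic id_2_objs id_2_traffic total_frames → Spec_unannotated_traffic id_2_objs id_2_traffic total_frames (unannotated_traffic id_2_objs id_2_traffic total_frames)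

-- ===== LEMMAS AND PROOFS =====

-- A's missing list is the in-order filter of the frame range by non-membership in ann.
theorem pv_missing_eq_filter (ann : PySem.Dict Int String) (n : Int) :
    PySem.List.sorted
      (PySem.Set.diff (PySem.Set.ofList (PySem.List.pyRange 0 n 1))
        (PySem.Set.ofList (PySem.Dict.keys ann))) (fun x => x)
      = (PySem.List.pyRange 0 n 1).filter (fun i => !(ann.contains i)) := by
  have hset : PySem.Set.ofList (PySem.List.pyRange 0 n 1) = PySem.List.pyRange 0 n 1 :=
    PySem.Set.ofList_eq_self_of_nodup _ (PySem.List.nodup_pyRange_one 0 n)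
  have hdiff : PySem.Set.diff (PySem.Set.ofList (PySem.List.pyRange 0 n 1))
      (PySem.Set.ofList (PySem.Dict.keys ann))
      = (PySem.List.pyRange 0 n 1).filter (fun i => !(ann.contains i)) := by
    rw [hset]
    show List.filter _ _ = _
    apply List.filter_congr
    intro i _
    have h1 : (PySem.Set.ofList (PySem.Dict.keys ann)).contains i = ann.contains i := by
      by_cases h : i ∈ PySem.Dict.keys ann
      · rw [(PySem.Set.contains_iff _ _).2 ((PySem.Set.mem_ofList _ _).2 h),
          (PySem.Dict.contains_iff_mem_keys _ _).2 h]
      · have c1 : (PySem.Set.ofList (PySem.Dict.keys ann)).contains i ≠ true := by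
          intro hc; exact h ((PySem.Set.mem_ofList _ _).1 ((PySem.Set.contains_iff _ _).1 hc))
        have c2 : ann.contains i ≠ true := by
          intro hc; exact h ((PySem.Dict.contains_iff_mem_keys _ _).1 hc)
        simp only [Bool.not_eq_true] at c1 c2
        rw [c1, c2]
    rw [h1]
  rw [hdiff]
  apply PySem.List.sorted_eq_self_of_pairwise
  exact ((PySem.List.pairwise_lt_pyRange_one 0 n).filter _).imp (fun h => le_of_lt h)

-- One forward pass over the frames computes exactly A's grouping of the filtered missing list,
-- with the last run kept open exactly when the last frame is missing.
theorem pv_scan_invariant (ann : PySem.Dict Int String) (j : Nat) :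
    (((PySem.List.pyRange 0 (j : Int) 1).filter (fun i => !(ann.contains i)) = [] →
        (PySem.List.pyRange 0 (j : Int) 1).foldl (pvStepB ann) ([], none) = ([], none)) ∧
     (∀ m0 rest, (PySem.List.pyRange 0 (j : Int) 1).filter (fun i => !(ann.contains i)) = m0 :: rest →
        (rest.foldl pvStepA ([], m0, m0)).2.2 < (j : Int) ∧
        (PySem.List.pyRange 0 (j : Int) 1).foldl (pvStepB ann) ([], none) =
          (if (rest.foldl pvStepA ([], m0, m0)).2.2 = (j : Int) - 1 then
            ((rest.foldl pvStepA ([], m0, m0)).1,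
              some ((rest.foldl pvStepA ([], m0, m0)).2.1, (rest.foldl pvStepA ([], m0, m0)).2.2))
          else
            ((rest.foldl pvStepA ([], m0, m0)).1 ++
              [((rest.foldl pvStepA ([], m0, m0)).2.1, (rest.foldl pvStepA ([], m0, m0)).2.2)], none)))) := by
  induction j with
  | zero =>
    constructor
    · intro _; rfl
    · intro m0 rest h
      rw [PySem.List.pyRange_one_eq_nil (by omega)] at h
      simp at h
  | succ k ih =>
    have hsplit : PySem.List.pyRange 0 ((k + 1 : Nat) : Int) 1
        = PySem.List.pyRange 0 (k : Int) 1 ++ [(k : Int)] := by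
      push_cast
      exact PySem.List.pyRange_one_succ_right (by positivity)
    rw [hsplit, List.filter_append, List.foldl_append]
    by_cases hann : ann.contains (k : Int) = true
    · -- frame k is annotated: the filter is unchanged, B closes any open run
      have hf : List.filter (fun i => !(ann.contains i)) [(k : Int)] = [] := by
        simp [hann]
      rw [hf, List.append_nil]
      constructor
      · intro h
        rw [ih.1 h]
        simp [pvStepB, hann]
      · intro m0 rest h
        obtain ⟨hlt, hst⟩ := ih.2 m0 rest h
        refine ⟨by push_cast; omega, ?_⟩
        rw [hst]
        by_cases hend : (rest.foldl pvStepA ([], m0, m0)).2.2 = (k : Int) - 1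
        · rw [if_pos hend, if_neg (by push_cast; omega)]
          simp [pvStepB, hann]
        · rw [if_neg hend, if_neg (by push_cast; omega)]
          simp [pvStepB, hann]
    · -- frame k is missing: the filter gains k, B opens or extends a run
      have hf : List.filter (fun i => !(ann.contains i)) [(k : Int)] = [(k : Int)] := by
        simp [hann]
      rw [hf]
      constructor
      · intro h
        rcases List.append_eq_nil_iff.1 h with ⟨-, h2⟩
        exact absurd h2 (by simp)
      · intro m0 rest h
        rcases heq : (PySem.List.pyRange 0 (k : Int) 1).filter (fun i => !(ann.contains i)) with _ | ⟨n0, nrest⟩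
        · -- previous filter empty: this run starts at k
          rw [heq] at h
          simp only [List.nil_append, List.cons.injEq] at h
          obtain ⟨hm0, hrest⟩ := h
          rw [ih.1 heq]
          subst hm0; subst hrest
          simp only [List.foldl_nil]
          refine ⟨by push_cast; omega, ?_⟩
          rw [if_pos (by push_cast; ring)]
          simp [pvStepB, hann]
        · -- previous filter n0 :: nrest: rest = nrest ++ [k]
          rw [heq] at h
          simp only [List.cons_append, List.cons.injEq] at h
          obtain ⟨hm0, hrest⟩ := h
          subst hrest
          subst hm0
          obtain ⟨hlt, hst⟩ := ih.2 n0 nrest heq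
          rw [hst, List.foldl_append]
          by_cases hend : (nrest.foldl pvStepA ([], n0, n0)).2.2 = (k : Int) - 1
          · -- run extends: prev = k - 1
            rw [if_pos hend]
            simp only [List.foldl_cons, List.foldl_nil]
            have hstep : ∀ st : List (Int × Int) × Int × Int, st.2.2 = (k : Int) - 1 →
                pvStepA st (k : Int) = (st.1, st.2.1, (k : Int)) := by
              intro st h
              unfold pvStepA
              rw [if_pos (by omega)]
            rw [hstep _ hend]
            refine ⟨by push_cast; omega, ?_⟩
            rw [if_pos (by push_cast; ring)]
            simp [pvStepB, hann]
          · -- gap: close the previous run and start a new one at k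
            rw [if_neg hend]
            simp only [List.foldl_cons, List.foldl_nil]
            have hstep : ∀ st : List (Int × Int) × Int × Int, st.2.2 ≠ (k : Int) - 1 →
                pvStepA st (k : Int) = (st.1 ++ [(st.2.1, st.2.2)], (k : Int), (k : Int)) := by
              intro st h
              unfold pvStepA
              rw [if_neg (by omega)]
            rw [hstep _ hend]
            refine ⟨by push_cast; omega, ?_⟩
            rw [if_pos (by push_cast; ring)]
            simp [pvStepB, hann]

-- The per-object bodies of the two outer folds agree on every accumulator and item.
theorem pv_body_eq (traffD : PySem.Dict Int (List (Int × String))) (total_frames : Int)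
    (acc : List String) (p : Int × String) :
    (if PySem.Str.isIn "bulb" p.2 then
      match PySem.List.sorted
          (PySem.Set.diff (PySem.Set.ofList (PySem.List.pyRange 0 total_frames 1))
            (PySem.Set.ofList (PySem.Dict.keys (PySem.Dict.ofList (traffD.getD p.1 []))))) (fun x => x) with
      | [] => acc
      | m0 :: rest =>
        acc ++ [pvLine p.1 p.2 (pvRangeStr ((rest.foldl pvStepA ([], m0, m0)).1 ++
          [((rest.foldl pvStepA ([], m0, m0)).2.1, (rest.foldl pvStepA ([], m0, m0)).2.2)]))]
    else acc)
    =
    (if PySem.Str.isIn "bulb" p.2 then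
      let t := (PySem.List.pyRange 0 total_frames 1).foldl
        (pvStepB (PySem.Dict.ofList (traffD.getD p.1 []))) ([], none)
      let ranges := t.1 ++ (match t.2 with | some c => [c] | none => [])
      if ranges.isEmpty then acc else acc ++ [pvLine p.1 p.2 (pvRangeStr ranges)]
    else acc) := by
  by_cases hb : PySem.Str.isIn "bulb" p.2 = true
  · rw [if_pos hb, if_pos hb]
    set ann := PySem.Dict.ofList (traffD.getD p.1 []) with hann
    rw [pv_missing_eq_filter ann total_frames]
    by_cases hn : total_frames ≤ 0
    · rw [PySem.List.pyRange_one_eq_nil hn]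
      rfl
    · obtain ⟨j, hj⟩ : ∃ j : Nat, total_frames = (j : Int) := ⟨total_frames.toNat, by omega⟩
      subst hj
      rcases heq : (PySem.List.pyRange 0 (j : Int) 1).filter (fun i => !(ann.contains i)) with _ | ⟨m0, rest⟩
      · rw [(pv_scan_invariant ann j).1 heq]
        rfl
      · obtain ⟨-, hst⟩ := (pv_scan_invariant ann j).2 m0 rest heq
        rw [hst]
        by_cases hend : (rest.foldl pvStepA ([], m0, m0)).2.2 = (j : Int) - 1
        · rw [if_pos hend]
          simp
        · rw [if_neg hend]
          simp
  · rw [if_neg hb, if_neg hb]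

-- ===== VERDICT (by name: the statement is the Claim_ definition above) =====
theorem unannotated_traffic_spec : Claim_equal_unannotated_traffic := by
  intro id_2_objs id_2_traffic total_frames _
  unfold Spec_unannotated_traffic unannotated_traffic unannotated_traffic_alt
  apply PySem.List.foldl_congr_mem
  intro acc p _
  exact pv_body_eq (PySem.Dict.ofList id_2_traffic) total_frames acc p
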